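-- pv_equiv track=rewrite | github.com/NutthanichN/grading-helper | week_6/6210546030_lab6.py | front_x
-- ===== SOURCE A (Python) =====
-- def front_x(list_text):
--     '''
--     This function gonna sort the text function but it gonna append string
--     with 'x' is the first character append in the front and all the string
--     eventhough the 'x'string is all sorted using only one parameter
--     'list_text'(list of text)
--
--     >>> front_x(['apple','income','bubble','xerath'])
--     ['xerath', 'apple', 'bubble', 'income']
--     >>> front_x(['ball','wave','bang','xayah'])
--     ['xayah', 'ball', 'bang', 'wave']
--     >>> front_x(['gragas','rekneton','jhin','xborg','xanadu'])
--     ['xanadu', 'xborg', 'gragas', 'jhin', 'rekneton']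
--     >>> front_x(['leona','lulu','malphite','kogmaw','xerox','xylophone'])
--     ['xerox', 'xylophone', 'kogmaw', 'leona', 'lulu', 'malphite']
--     >>> front_x(['zonya','xpeke','back','door'])
--     ['xpeke', 'back', 'door', 'zonya']
--     '''
--     sort_list = []
--     unsort_list = []
--     for i in list_text:
--         if 'x' in i[0].lower() :
--             sort_list.append(i)
--             sort_list.sort()
--         else:
--             unsort_list.append(i)
--             unsort_list.sort()
--     return sort_list+unsort_list
-- ===== SOURCE B (Python) =====
-- def front_x(list_text):
--     x_words = sorted(s for s in list_text if s[0].lower() == 'x')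
--     rest = sorted(s for s in list_text if s[0].lower() != 'x')
--     return x_words + rest
-- ===== Notes on version B (the rewrite author's own statement) =====
-- stated objective: faster
-- what changed: A re-sorts the growing group list after every single append (sort inside the loop); B partitions the list into the two groups and sorts each group exactly once at the end.
import Mathlib
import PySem

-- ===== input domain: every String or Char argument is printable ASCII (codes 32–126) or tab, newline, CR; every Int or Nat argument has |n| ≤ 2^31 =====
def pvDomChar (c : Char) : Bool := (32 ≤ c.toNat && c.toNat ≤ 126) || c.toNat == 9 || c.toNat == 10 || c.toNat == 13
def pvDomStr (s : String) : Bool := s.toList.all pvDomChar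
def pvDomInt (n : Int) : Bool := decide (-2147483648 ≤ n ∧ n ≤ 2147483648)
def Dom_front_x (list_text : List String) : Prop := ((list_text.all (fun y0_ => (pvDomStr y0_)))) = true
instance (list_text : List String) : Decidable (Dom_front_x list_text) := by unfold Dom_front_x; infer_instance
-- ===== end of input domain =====

-- B partitions the list into the two groups once and sorts each group once at the end,
-- instead of A's re-sorting a group after every single append; equal return value on Pre_.


-- ===== PORT A =====
-- literal port of A: one loop, each element appended to its group and that group re-sorted at once
def front_x (list_text : List String) : List String :=
  let st := list_text.foldl (fun (st : List String × List String) i =>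
    match PySem.Str.pyGet? i 0 with
    | some c =>
        -- 'x' in i[0].lower()
        if PySem.Chars.isIn ['x'] (PySem.Chars.lower [c]) then
          (PySem.List.sorted (st.1 ++ [i]) (fun x => x) false, st.2)
        else
          (st.1, PySem.List.sorted (st.2 ++ [i]) (fun x => x) false)
    | none => st   -- Python raises IndexError here; excluded by Pre_front_x
    ) ([], [])
  st.1 ++ st.2

-- ===== PORT B =====
-- s[0].lower() == 'x'  (none branch unreachable under Pre_front_x; Python raises IndexError there)
def pvIsX (s : String) : Bool :=
  match PySem.Str.pyGet? s 0 with
  | some c => PySem.Chars.lowerChar c == 'x'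
  | none => false

def front_x_alt (list_text : List String) : List String :=
  PySem.List.sorted (list_text.filter (fun s => pvIsX s)) (fun x => x) false ++
  PySem.List.sorted (list_text.filter (fun s => !pvIsX s)) (fun x => x) false

-- ===== PRECONDITION & SPEC =====
-- Pre_ excludes lists containing an empty string: there both A and B raise IndexError on i[0].
def Pre_front_x (list_text : List String) : Prop := ∀ s ∈ list_text, s ≠ ""
instance (list_text : List String) : Decidable (Pre_front_x list_text) := by unfold Pre_front_x; infer_instance

def pvWitness_front_x : List String := ["xerath", "apple", "xb", "zz"]

def Spec_front_x (list_text : List String) (out : List String) : Prop := out = front_x_alt list_text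
instance (list_text : List String) (out : List String) : Decidable (Spec_front_x list_text out) := by unfold Spec_front_x; infer_instance

-- ===== CLAIM (what is proved, stated in full; the proofs are below) =====
def Claim_equal_front_x : Prop := ∀ (list_text : List String), Dom_front_x list_text → Pre_front_x list_text → Spec_front_x list_text (front_x list_text)

-- ===== LEMMAS AND PROOFS =====

-- 'x' in a one-character string is equality of that character with 'x'
theorem pvIsIn_singleton (a d : Char) : PySem.Chars.isIn [a] [d] = (d == a) := by
  by_cases h : d = a
  · subst h; simp [PySem.Chars.isIn_iff_infix]
  · have hb : (d == a) = false := by simp [h]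
    rw [hb, PySem.Chars.isIn_eq_false_iff]
    intro hinf
    exact h ((List.mem_singleton).1 (hinf.sublist.mem (List.mem_singleton_self a))).symm

-- A's per-element test agrees with B's on nonempty strings
theorem pvStep_eq (i : String) (c : Char) (h : PySem.Str.pyGet? i 0 = some c) :
    PySem.Chars.isIn ['x'] (PySem.Chars.lower [c]) = pvIsX i := by
  unfold pvIsX
  rw [h]
  show PySem.Chars.isIn ['x'] [PySem.Chars.lowerChar c] = _
  rw [pvIsIn_singleton]

-- re-sorting after appending to an already sorted list = sorting the appended list once
theorem pvSorted_snoc (xs : List String) (i : String) :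
    PySem.List.sorted (PySem.List.sorted xs (fun x => x) false ++ [i]) (fun x => x) false
      = PySem.List.sorted (xs ++ [i]) (fun x => x) false := by
  exact PySem.List.sorted_eq_sorted_of_perm _ _ _ (fun _ _ h => h)
    ((PySem.List.sorted_perm xs (fun x => x) false).append_right [i])

-- loop invariant: the two accumulators are the sorted filtered prefixes
theorem pvInv (p : String → Bool) (l t : List String) :
    l.foldl (fun (st : List String × List String) i =>
        if p i then
          (PySem.List.sorted (st.1 ++ [i]) (fun x => x) false, st.2)
        else
          (st.1, PySem.List.sorted (st.2 ++ [i]) (fun x => x) false))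
      (PySem.List.sorted (t.filter p) (fun x => x) false,
       PySem.List.sorted (t.filter (fun s => !p s)) (fun x => x) false)
    = (PySem.List.sorted ((t ++ l).filter p) (fun x => x) false,
       PySem.List.sorted ((t ++ l).filter (fun s => !p s)) (fun x => x) false) := by
  induction l generalizing t with
  | nil => simp
  | cons i l ih =>
    simp only [List.foldl_cons]
    by_cases hp : p i
    · rw [if_pos hp, pvSorted_snoc]
      have h1 : t.filter p ++ [i] = (t ++ [i]).filter p := by simp [List.filter_append, hp]
      have h2 : t.filter (fun s => !p s) = (t ++ [i]).filter (fun s => !p s) := by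
        simp [List.filter_append, hp]
      rw [h1, h2, ih (t ++ [i])]
      simp
    · rw [if_neg hp, pvSorted_snoc]
      have h1 : t.filter p = (t ++ [i]).filter p := by simp [List.filter_append, hp]
      have h2 : t.filter (fun s => !p s) ++ [i] = (t ++ [i]).filter (fun s => !p s) := by
        simp [List.filter_append, hp]
      rw [h1, h2, ih (t ++ [i])]
      simp

-- ===== VERDICT (by name: the statement is the Claim_ definition above) =====
theorem front_x_spec : Claim_equal_front_x := by
  intro l _ hpre
  show front_x l = front_x_alt l
  unfold front_x front_x_alt
  have hcongr : l.foldl (fun (st : List String × List String) i =>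
      match PySem.Str.pyGet? i 0 with
      | some c =>
          if PySem.Chars.isIn ['x'] (PySem.Chars.lower [c]) then
            (PySem.List.sorted (st.1 ++ [i]) (fun x => x) false, st.2)
          else
            (st.1, PySem.List.sorted (st.2 ++ [i]) (fun x => x) false)
      | none => st) ([], []) =
    l.foldl (fun (st : List String × List String) i =>
        if pvIsX i then
          (PySem.List.sorted (st.1 ++ [i]) (fun x => x) false, st.2)
        else
          (st.1, PySem.List.sorted (st.2 ++ [i]) (fun x => x) false)) ([], []) := by
    apply PySem.List.foldl_congr_mem
    intro acc x hx
    have hne : x.toList ≠ [] := by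
      intro hl
      exact hpre x hx (by rw [← String.ofList_toList (s := x), hl])
    obtain ⟨c, cs, hc⟩ : ∃ c cs, x.toList = c :: cs := by
      cases hl : x.toList with
      | nil => exact absurd hl hne
      | cons c cs => exact ⟨c, cs, rfl⟩
    have hg : PySem.Str.pyGet? x 0 = some c := by
      simp [hc, PySem.List.pyGet?, PySem.List.pyIdx?]
    rw [hg]
    show (if PySem.Chars.isIn ['x'] (PySem.Chars.lower [c]) then _ else _) = _
    rw [pvStep_eq x c hg]
  simp only [hcongr]
  have h := pvInv pvIsX l []
  simp only [List.filter_nil, List.nil_append] at h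
  have hnil : PySem.List.sorted ([] : List String) (fun x => x) false = [] := rfl
  rw [hnil] at h
  rw [h]
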